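-- pv_equiv track=rewrite | github.com/xxGradzix/emsib-backend-data-processing | optimization/optimizer.py | compute_optimal_settings
-- ===== SOURCE A (Python) =====
-- def compute_optimal_settings(predicted_demand):
--     settings = []
--     for kwh in predicted_demand:
--         if kwh > 60:
--             settings.append({"HVAC_level": "LOW"})
--         elif kwh > 40:
--             settings.append({"HVAC_level": "MEDIUM"})
--         else:
--             settings.append({"HVAC_level": "HIGH"})
--     return settings
-- ===== SOURCE B (Python) =====
-- # Three staged passes, one per HVAC category: outer loop over an interval table,
-- # each pass stamps its label into the slots of matching demand values.
-- _CATEGORIES = (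
--     ("HIGH",   lambda k: k <= 40),
--     ("MEDIUM", lambda k: 40 < k <= 60),
--     ("LOW",    lambda k: 60 < k),
-- )
--
-- def compute_optimal_settings(predicted_demand):
--     out = [None] * len(predicted_demand)
--     for label, test in _CATEGORIES:
--         out = [{"HVAC_level": label} if test(kwh) else cur
--                for cur, kwh in zip(out, predicted_demand)]
--     return out
-- ===== Notes on version B (the rewrite author's own statement) =====
-- stated objective: alternative
-- what changed: Inverts the loop nesting: instead of one pass with a per-element if/elif/else cascade, B iterates over a table of (label, predicate) categories and makes one zip-pass per category, stamping that label into the matching slots of a preallocated output list.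
import Mathlib
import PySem

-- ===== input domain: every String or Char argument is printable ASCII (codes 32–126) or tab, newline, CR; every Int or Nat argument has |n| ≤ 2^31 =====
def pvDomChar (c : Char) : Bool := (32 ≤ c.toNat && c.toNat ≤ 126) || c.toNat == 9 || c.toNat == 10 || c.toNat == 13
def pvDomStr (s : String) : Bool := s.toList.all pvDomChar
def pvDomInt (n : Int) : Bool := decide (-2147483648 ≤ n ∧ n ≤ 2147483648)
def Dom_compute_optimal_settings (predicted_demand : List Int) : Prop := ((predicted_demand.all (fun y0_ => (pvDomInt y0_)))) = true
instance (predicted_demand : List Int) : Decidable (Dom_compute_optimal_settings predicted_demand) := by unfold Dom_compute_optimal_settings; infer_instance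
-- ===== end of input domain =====

-- B inverts A's loop nesting: it iterates over a (label, predicate) category table and
-- does one zip-pass per category, stamping the label into matching output slots (alternative structure).


-- ===== PORT A =====
-- settings = []; for kwh in …: append one singleton dict chosen by the if/elif/else cascade
def compute_optimal_settings (predicted_demand : List Int) : List (List (String × String)) :=
  predicted_demand.foldl
    (fun settings kwh =>
      if kwh > 60 then settings ++ [[("HVAC_level", "LOW")]]
      else if kwh > 40 then settings ++ [[("HVAC_level", "MEDIUM")]]
      else settings ++ [[("HVAC_level", "HIGH")]])
    []

-- ===== PORT B =====
-- category table: (label, membership predicate); the predicates are exhaustive and disjoint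
def pvCategories : List (String × (Int → Bool)) :=
  [("HIGH",   fun k => k ≤ 40),
   ("MEDIUM", fun k => 40 < k && k ≤ 60),
   ("LOW",    fun k => 60 < k)]

-- out = [None]*n; for each category, one zip-pass stamping its label into matching slots.
-- Python's None placeholder is modelled by []; since the categories are exhaustive, no
-- placeholder survives to the result, so this is exact.
def compute_optimal_settings_alt (predicted_demand : List Int) : List (List (String × String)) :=
  pvCategories.foldl
    (fun out cat =>
      List.zipWith (fun cur kwh => if cat.2 kwh then [("HVAC_level", cat.1)] else cur)
        out predicted_demand)
    (List.replicate predicted_demand.length [])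

-- ===== PRECONDITION & SPEC =====
def Spec_compute_optimal_settings (predicted_demand : List Int) (out : List (List (String × String))) : Prop := out = compute_optimal_settings_alt predicted_demand
instance (predicted_demand : List Int) (out : List (List (String × String))) : Decidable (Spec_compute_optimal_settings predicted_demand out) := by unfold Spec_compute_optimal_settings; infer_instance

-- ===== CLAIM (what is proved, stated in full; the proofs are below) =====
def Claim_equal_compute_optimal_settings : Prop := ∀ (predicted_demand : List Int), Dom_compute_optimal_settings predicted_demand → Spec_compute_optimal_settings predicted_demand (compute_optimal_settings predicted_demand)

-- ===== LEMMAS AND PROOFS =====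

-- the cascade value of one element
def pvCascade (kwh : Int) : List (String × String) :=
  if kwh > 60 then [("HVAC_level", "LOW")]
  else if kwh > 40 then [("HVAC_level", "MEDIUM")]
  else [("HVAC_level", "HIGH")]

-- B peels one element off the front: the three zip-passes act independently per position
theorem pv_alt_cons (x : Int) (xs : List Int) :
    compute_optimal_settings_alt (x :: xs) = pvCascade x :: compute_optimal_settings_alt xs := by
  unfold compute_optimal_settings_alt pvCategories pvCascade
  simp only [List.foldl, List.length_cons, List.replicate_succ, List.zipWith_cons_cons]
  by_cases h1 : x > 60
  · simp [h1, show ¬ (x ≤ 40) by omega]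
  · by_cases h2 : x > 40
    · simp [h1, h2, show ¬ (x ≤ 40) by omega, show x ≤ 60 by omega]
    · simp [h1, h2, show x ≤ 40 by omega]
-- A's append-accumulator loop computes the map of the cascade
theorem pv_foldl_eq_map (xs : List Int) (acc : List (List (String × String))) :
    xs.foldl
      (fun settings kwh =>
        if kwh > 60 then settings ++ [[("HVAC_level", "LOW")]]
        else if kwh > 40 then settings ++ [[("HVAC_level", "MEDIUM")]]
        else settings ++ [[("HVAC_level", "HIGH")]])
      acc
    = acc ++ xs.map pvCascade := by
  induction xs generalizing acc with
  | nil => simp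
  | cons k xs ih =>
    simp only [List.foldl, List.map]
    rw [show (if k > 60 then acc ++ [[("HVAC_level", "LOW")]]
       else if k > 40 then acc ++ [[("HVAC_level", "MEDIUM")]]
       else acc ++ [[("HVAC_level", "HIGH")]]) = acc ++ [pvCascade k] by
         unfold pvCascade; split_ifs <;> rfl]
    rw [ih, List.append_assoc]
    rfl

-- B computes the same map
theorem pv_alt_eq_map (xs : List Int) :
    compute_optimal_settings_alt xs = xs.map pvCascade := by
  induction xs with
  | nil => rfl
  | cons x xs ih => rw [pv_alt_cons, ih, List.map]

-- ===== VERDICT (by name: the statement is the Claim_ definition above) =====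
theorem compute_optimal_settings_spec : Claim_equal_compute_optimal_settings := by
  intro xs _
  show compute_optimal_settings xs = compute_optimal_settings_alt xs
  rw [pv_alt_eq_map]
  unfold compute_optimal_settings
  simpa using pv_foldl_eq_map xs []
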